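-- pv_equiv track=rewrite | github.com/Nihilantropy/godot-mcp-docs | utils/file_utils.py | get_file_sections
-- ===== SOURCE A (Python) =====
-- from typing import List, Optional
--
-- def get_file_sections(content: str) -> List[str]:
--     """
--     Extract section headers from markdown content
--
--     Args:
--         content: Markdown content
--
--     Returns:
--         List of section headers
--     """
--     lines = content.split('\n')
--     sections = []
--
--     for line in lines:
--         stripped = line.strip()
--         if stripped.startswith('#'):
--             # Remove markdown header symbols and clean up
--             header = stripped.lstrip('#').strip()
--             if header:
--                 sections.append(header)
--
--     return sections
-- ===== SOURCE B (Python) =====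
-- def get_file_sections(content):
--     """Extract section headers from markdown content (single index-based scan,
--     no str methods)."""
--     ws = ' \t\r'
--     sections = []
--     n = len(content)
--     i = 0
--     while i <= n:
--         j = i
--         while j < n and content[j] != '\n':
--             j += 1
--         # line is content[i:j]
--         k = i
--         while k < j and content[k] in ws:
--             k += 1
--         if k < j and content[k] == '#':
--             while k < j and content[k] == '#':
--                 k += 1
--             while k < j and content[k] in ws:
--                 k += 1
--             e = j
--             while e > k and content[e - 1] in ws:
--                 e -= 1
--             if e > k:
--                 sections.append(content[k:e])
--         i = j + 1
--     return sections
-- ===== Notes on version B (the rewrite author's own statement) =====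
-- stated objective: alternative
-- what changed: B replaces A's split-into-lines plus per-line strip/startswith/lstrip/strip pipeline by a single index-based scan of the raw string that computes each header's slice bounds with explicit pointers and never calls a string method.
import Mathlib
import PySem

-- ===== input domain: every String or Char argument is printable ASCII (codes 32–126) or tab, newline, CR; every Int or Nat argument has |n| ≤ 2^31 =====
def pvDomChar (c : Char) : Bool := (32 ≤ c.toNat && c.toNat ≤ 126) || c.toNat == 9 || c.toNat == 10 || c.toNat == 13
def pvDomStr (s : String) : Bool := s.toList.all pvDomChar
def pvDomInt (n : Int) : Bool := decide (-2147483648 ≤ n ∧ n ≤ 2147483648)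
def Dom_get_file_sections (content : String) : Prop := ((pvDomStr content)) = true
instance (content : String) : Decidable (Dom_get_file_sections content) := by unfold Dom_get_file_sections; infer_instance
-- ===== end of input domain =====

-- B replaces A's per-line strip/startswith/lstrip/strip pipeline by one index-based scan
-- of the raw string computing each header's slice bounds directly; equal on Dom, no speed claim.

-- ===== PORT A =====
-- Port of A over List Char; `stripped.lstrip('#')` is ported by hand as dropWhile (== '#')
-- (exact: lstrip('#') removes exactly the leading '#' characters).
def get_file_sections (content : String) : List String :=
  let lines := PySem.Chars.splitOn content.toList ['\n']   -- content.split('\n'); sep is nonempty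
  let sections := lines.foldl (fun sections line =>
    let stripped := PySem.Chars.strip line
    if PySem.Chars.startswith stripped ['#'] then
      let header := PySem.Chars.strip (List.dropWhile (fun ch => ch == '#') stripped)
      if header ≠ [] then sections ++ [header] else sections
    else sections) []
  sections.map String.ofList

-- ===== PORT B =====
-- Source B's `content[k] in ' \t\r'` test
def bIsWs (c : Char) : Bool := c == ' ' || c == '\t' || c == '\r'

-- Source B's inner `while j < n and content[j] != '\n'` scan: the current line and,
-- if a '\n' was found, the rest of the string after it.
def bSplitNl : List Char → List Char × Option (List Char)
  | [] => ([], none)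
  | c :: cs =>
    if c = '\n' then ([], some cs)
    else
      let (l, r) := bSplitNl cs
      (c :: l, r)

theorem bSplitNl_rest_length : ∀ (cs l r : List Char), bSplitNl cs = (l, some r) → r.length < cs.length := by
  intro cs
  induction cs with
  | nil => intro l r h; simp [bSplitNl] at h
  | cons c cs ih =>
    intro l r h
    by_cases hc : c = '\n'
    · simp [bSplitNl, hc] at h
      simp [h.2]
    · simp only [bSplitNl, if_neg hc] at h
      obtain ⟨h1, h2⟩ := Prod.mk.injEq .. ▸ h
      have := ih (bSplitNl cs).1 r (by cases hr : bSplitNl cs; simp_all)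
      simpa using Nat.lt_succ_of_lt this

-- Source B's three pointer scans inside one line (k past ws, k past '#'s, k past ws,
-- e back over trailing ws) and the `if e > k: append(content[k:e])`.
def bProcessLine (line : List Char) : List (List Char) :=
  let l1 := List.dropWhile bIsWs line
  if l1.head? == some '#' then
    let l2 := List.dropWhile bIsWs (List.dropWhile (fun ch => ch == '#') l1)
    let l3 := (List.dropWhile bIsWs l2.reverse).reverse
    if l3 ≠ [] then [l3] else []
  else []

-- Source B's outer `while i <= n` loop over lines.
def bGo (cs : List Char) : List (List Char) :=
  match h : bSplitNl cs with
  | (line, none) => bProcessLine line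
  | (line, some rest) => bProcessLine line ++ bGo rest
termination_by cs.length
decreasing_by exact bSplitNl_rest_length cs line rest h

def get_file_sections_alt (content : String) : List String :=
  (bGo content.toList).map String.ofList

-- ===== PRECONDITION & SPEC =====
def Spec_get_file_sections (content : String) (out : List String) : Prop := out = get_file_sections_alt content
instance (content : String) (out : List String) : Decidable (Spec_get_file_sections content out) := by unfold Spec_get_file_sections; infer_instance

-- ===== CLAIM (what is proved, stated in full; the proofs are below) =====
def Claim_equal_get_file_sections : Prop := ∀ (content : String), Dom_get_file_sections content → Spec_get_file_sections content (get_file_sections content)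

-- ===== LEMMAS AND PROOFS =====

def linesOf : List Char → List (List Char)
  | [] => [[]]
  | c :: rest =>
    if c = '\n' then [] :: linesOf rest
    else
      match linesOf rest with
      | [] => [[c]]
      | l :: ls => (c :: l) :: ls

theorem linesOf_ne_nil (cs : List Char) : linesOf cs ≠ [] := by
  induction cs with
  | nil => simp [linesOf]
  | cons c rest ih =>
    by_cases hc : c = '\n'
    · simp [linesOf, hc]
    · simp only [linesOf, if_neg hc]
      cases h : linesOf rest <;> simp

theorem splitOn_go_newline : ∀ (fuel : Nat) (l cur : List Char) (acc : List (List Char)),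
    l.length ≤ fuel →
    PySem.Chars.splitOn.go ['\n'] fuel l cur acc =
      acc.reverse ++ (match linesOf l with
        | [] => [cur.reverse]
        | x :: xs => (cur.reverse ++ x) :: xs) := by
  intro fuel
  induction fuel with
  | zero =>
    intro l cur acc hl
    have : l = [] := by cases l <;> simp_all
    subst this
    simp [PySem.Chars.splitOn.go, linesOf]
  | succ n ih =>
    intro l cur acc hl
    cases l with
    | nil => simp [PySem.Chars.splitOn.go, linesOf]
    | cons c rest =>
      by_cases hc : c = '\n'
      · subst hc
        have hpre : List.isPrefixOf ['\n'] ('\n' :: rest) = true := by simp [List.isPrefixOf]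
        rw [PySem.Chars.splitOn.go]
        simp only [hpre, if_pos]
        rw [show List.drop (List.length ['\n']) ('\n' :: rest) = rest by simp]
        rw [ih rest [] (List.reverse cur :: acc) (by simpa using Nat.le_of_succ_le_succ hl)]
        simp only [linesOf, if_pos rfl]
        cases h : linesOf rest with
        | nil => exact absurd h (linesOf_ne_nil rest)
        | cons x xs => simp
      · have hpre : List.isPrefixOf ['\n'] (c :: rest) = false := by
          simp [List.isPrefixOf]; exact fun h => absurd h.symm hc
        rw [PySem.Chars.splitOn.go]
        simp only [hpre, Bool.false_eq_true, if_false]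
        rw [ih rest (c :: cur) acc (by simpa using Nat.le_of_succ_le_succ hl)]
        simp only [linesOf, if_neg hc]
        cases h : linesOf rest with
        | nil => exact absurd h (linesOf_ne_nil rest)
        | cons x xs => simp

theorem splitOn_newline (cs : List Char) :
    PySem.Chars.splitOn cs ['\n'] = linesOf cs := by
  unfold PySem.Chars.splitOn
  rw [splitOn_go_newline (cs.length + 1) cs [] [] (by omega)]
  cases h : linesOf cs with
  | nil => exact absurd h (linesOf_ne_nil cs)
  | cons x xs => simp

theorem mem_linesOf (cs : List Char) (line : List Char) (hline : line ∈ linesOf cs) :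
    ∀ c ∈ line, c ∈ cs ∧ c ≠ '\n' := by
  induction cs generalizing line with
  | nil => simp [linesOf] at hline; simp [hline]
  | cons c rest ih =>
    by_cases hc : c = '\n'
    · subst hc
      simp only [linesOf, if_pos] at hline
      rcases List.mem_cons.mp hline with h | h
      · simp [h]
      · intro x hx; have := ih line h x hx; exact ⟨by simp [this.1], this.2⟩
    · simp only [linesOf, if_neg hc] at hline
      cases h : linesOf rest with
      | nil => exact absurd h (linesOf_ne_nil rest)
      | cons l ls =>
        rw [h] at hline
        rcases List.mem_cons.mp hline with h1 | h1
        · subst h1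
          intro x hx
          rcases List.mem_cons.mp hx with rfl | hx'
          · exact ⟨by simp, hc⟩
          · have := ih l (by simp [h]) x hx'
            exact ⟨by simp [this.1], this.2⟩
        · intro x hx
          have := ih line (by simp [h, h1]) x hx
          exact ⟨by simp [this.1], this.2⟩


theorem char_eq_iff_toNat (c d : Char) : c = d ↔ c.toNat = d.toNat := by
  constructor
  · intro h; rw [h]
  · intro h; exact Char.ext (by simpa [Char.toNat] using UInt32.toNat_inj.mp h)

theorem isspace_eq_bIsWs (c : Char) (hd : pvDomChar c = true) (hn : c ≠ '\n') :
    PySem.Chars.isspace c = bIsWs c := by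
  simp only [pvDomChar, Bool.or_eq_true, Bool.and_eq_true, decide_eq_true_eq, beq_iff_eq] at hd
  have hn' : c.toNat ≠ 10 := fun h => hn ((char_eq_iff_toNat c '\n').mpr h)
  rw [Bool.eq_iff_iff]
  simp only [PySem.Chars.isspace, bIsWs, Bool.or_eq_true, Bool.and_eq_true,
    decide_eq_true_eq, beq_iff_eq, char_eq_iff_toNat]
  have e1 : ' '.toNat = 32 := rfl
  have e2 : '\t'.toNat = 9 := rfl
  have e3 : '\r'.toNat = 13 := rfl
  rw [e1, e2, e3]
  omega

def rsw (l : List Char) : List Char := (List.dropWhile bIsWs l.reverse).reverse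

theorem dropWhile_congr' {α : Type} (p q : α → Bool) (l : List α)
    (h : ∀ a ∈ l, p a = q a) : List.dropWhile p l = List.dropWhile q l := by
  induction l with
  | nil => rfl
  | cons a t ih =>
    have ha := h a (by simp)
    simp only [List.dropWhile_cons, ha]
    split
    · exact ih (fun b hb => h b (by simp [hb]))
    · rfl

theorem rsw_all_ws (l t : List Char) (h : ∀ c ∈ t, bIsWs c = true) :
    rsw (l ++ t) = rsw l := by
  unfold rsw
  rw [List.reverse_append, List.dropWhile_append]
  have : List.dropWhile bIsWs t.reverse = [] := by
    rw [List.dropWhile_eq_nil_iff]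
    intro c hc; exact h c (by simpa using hc)
  simp [this]

theorem rsw_append (l t : List Char) (h : List.dropWhile bIsWs t.reverse ≠ []) :
    rsw (l ++ t) = l ++ rsw t := by
  unfold rsw
  rw [List.reverse_append, List.dropWhile_append]
  simp [List.isEmpty_iff, h]

theorem rsw_cons (c : Char) (t : List Char) (h : bIsWs c = false) :
    rsw (c :: t) = c :: rsw t := by
  have : (c :: t) = [c] ++ t := rfl
  rw [this]
  by_cases ht : List.dropWhile bIsWs t.reverse = []
  · have hall : ∀ x ∈ t, bIsWs x = true := by
      rw [List.dropWhile_eq_nil_iff] at ht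
      intro x hx; exact ht x (by simpa using hx)
    simp [rsw, List.dropWhile_append, ht, List.dropWhile_cons, h]
  · rw [rsw_append [c] t ht]; simp [rsw, List.dropWhile, h]

theorem dropWhile_idem {α : Type} (p : α → Bool) (l : List α) :
    List.dropWhile p (List.dropWhile p l) = List.dropWhile p l := by
  induction l with
  | nil => rfl
  | cons a t ih =>
    by_cases hp : p a
    · simpa [List.dropWhile_cons, hp] using ih
    · simp [List.dropWhile_cons, hp]

theorem rsw_idem (l : List Char) : rsw (rsw l) = rsw l := by
  unfold rsw
  simp [dropWhile_idem]

theorem dropWhile_head_false {α : Type} (p : α → Bool) (l : List α) (c : α) (t : List α)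
    (h : List.dropWhile p l = c :: t) : p c = false := by
  induction l with
  | nil => simp at h
  | cons a l ih =>
    by_cases hp : p a
    · exact ih (by simpa [List.dropWhile_cons, hp] using h)
    · simp only [List.dropWhile_cons, hp] at h
      simp_all [Bool.not_eq_true]

theorem bIsWs_hash (c : Char) (h : bIsWs c = true) : (c == '#') = false := by
  simp only [bIsWs, Bool.or_eq_true, beq_iff_eq] at h ⊢
  rcases h with (rfl | rfl) | rfl <;> decide

theorem bSplitNl_linesOf (cs : List Char) :
    linesOf cs = (match bSplitNl cs with
      | (l, none) => [l]
      | (l, some r) => l :: linesOf r) := by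
  induction cs with
  | nil => simp [bSplitNl, linesOf]
  | cons c rest ih =>
    by_cases hc : c = '\n'
    · simp [bSplitNl, linesOf, hc]
    · simp only [bSplitNl, if_neg hc, linesOf]
      cases hb : bSplitNl rest with
      | mk l r =>
        cases r with
        | none => rw [ih]; simp [hb]
        | some rr => rw [ih]; simp [hb]

theorem bGo_eq_flatMap (cs : List Char) : bGo cs = (linesOf cs).flatMap bProcessLine := by
  induction cs using bGo.induct with
  | case1 cs line h =>
    rw [bGo, h, bSplitNl_linesOf cs, h]
    simp
  | case2 cs line rest h ih =>
    rw [bGo, h, bSplitNl_linesOf cs, h]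
    simpa using ih

theorem hash_not_ws (x : Char) (h : (x == '#') = true) : bIsWs x = false := by
  rw [beq_iff_eq] at h; subst h; decide

theorem rsw_no_ws (l : List Char) (h : ∀ x ∈ l, bIsWs x = false) : rsw l = l := by
  unfold rsw
  rw [show List.dropWhile bIsWs l.reverse = l.reverse from ?_, List.reverse_reverse]
  cases hr : l.reverse with
  | nil => rfl
  | cons a r =>
    have ha : bIsWs a = false := h a (by rw [← List.mem_reverse, hr]; simp)
    simp [List.dropWhile_cons, ha]

-- the combined trailing-strip step shared by both sides after the '#'s are gone
theorem stripHash (t : List Char) (ht : ∀ x ∈ t, PySem.Chars.isspace x = bIsWs x) :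
    PySem.Chars.strip (List.dropWhile (fun ch => ch == '#') (rsw t)) =
      rsw (List.dropWhile bIsWs (List.dropWhile (fun ch => ch == '#') t)) := by
  have hhs : ∀ x ∈ List.takeWhile (fun ch => ch == '#') t, (x == '#') = true :=
    fun x hx => List.mem_takeWhile_imp (p := fun ch => ch == '#') hx
  have hteq : List.takeWhile (fun ch => ch == '#') t ++ List.dropWhile (fun ch => ch == '#') t = t :=
    List.takeWhile_append_dropWhile
  by_cases hall : ∀ x ∈ List.dropWhile (fun ch => ch == '#') t, bIsWs x = true
  · have h1 : rsw t = List.takeWhile (fun ch => ch == '#') t := by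
      conv_lhs => rw [← hteq]
      rw [rsw_all_ws _ _ hall, rsw_no_ws _ (fun x hx => hash_not_ws x (hhs x hx))]
    have h2 : List.dropWhile (fun ch => ch == '#') (List.takeWhile (fun ch => ch == '#') t) = [] :=
      List.dropWhile_eq_nil_iff.mpr hhs
    have h3 : List.dropWhile bIsWs (List.dropWhile (fun ch => ch == '#') t) = [] :=
      List.dropWhile_eq_nil_iff.mpr hall
    rw [h1, h2, h3]
    rfl
  · -- there is a non-whitespace character after the leading '#'s
    set t' := List.dropWhile (fun ch => ch == '#') t with ht'
    set v := List.dropWhile bIsWs t' with hvdef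
    have hv : v ≠ [] := fun h0 => hall (List.dropWhile_eq_nil_iff.mp h0)
    cases hv' : v with
    | nil => exact absurd hv' hv
    | cons e u' =>
    have hew : bIsWs e = false := dropWhile_head_false bIsWs t' e u' (hvdef ▸ hv')
    have hsub_v_t' : ∀ x ∈ v, x ∈ t' := fun x hx => (List.dropWhile_sublist bIsWs).subset hx
    have hsub_t'_t : ∀ x ∈ t', x ∈ t := fun x hx => (List.dropWhile_sublist _).subset hx
    have hsub_ws1_t' : ∀ x ∈ List.takeWhile bIsWs t', x ∈ t' :=
      fun x hx => (List.takeWhile_sublist _).subset hx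
    have hws1 : ∀ x ∈ List.takeWhile bIsWs t', bIsWs x = true := fun x hx => List.mem_takeWhile_imp hx
    have hrevne_v : List.dropWhile bIsWs v.reverse ≠ [] := by
      intro h0
      have := List.dropWhile_eq_nil_iff.mp h0 e (by rw [List.mem_reverse, hv']; simp)
      rw [this] at hew; exact Bool.true_eq_false.mp hew
    have hrevne_t' : List.dropWhile bIsWs t'.reverse ≠ [] := by
      intro h0
      have := List.dropWhile_eq_nil_iff.mp h0 e
        (by rw [List.mem_reverse]; exact hsub_t'_t e (hsub_v_t' e (by rw [hv']; simp)) |> fun _ => hsub_v_t' e (by rw [hv']; simp))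
      rw [this] at hew; exact Bool.true_eq_false.mp hew
    have ht'eq : List.takeWhile bIsWs t' ++ v = t' := List.takeWhile_append_dropWhile
    have hrswt' : rsw t' = List.takeWhile bIsWs t' ++ rsw v := by
      conv_lhs => rw [← ht'eq]
      rw [rsw_append _ _ hrevne_v]
    have hrswt : rsw t = List.takeWhile (fun ch => ch == '#') t ++ (List.takeWhile bIsWs t' ++ rsw v) := by
      conv_lhs => rw [← hteq]
      rw [rsw_append _ _ hrevne_t', hrswt']
    have hdhs : List.dropWhile (fun ch => ch == '#') (List.takeWhile (fun ch => ch == '#') t) = [] :=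
      List.dropWhile_eq_nil_iff.mpr hhs
    have hrswv_cons : rsw v = e :: rsw u' := by rw [hv', rsw_cons e u' hew]
    -- dropping the leading '#'s stops right at the start of (ws1 ++ rsw v)
    have hdrop : List.dropWhile (fun ch => ch == '#') (rsw t) = List.takeWhile bIsWs t' ++ rsw v := by
      rw [hrswt, List.dropWhile_append, hdhs]
      simp only [List.isEmpty_nil, if_true]
      cases hws1c : List.takeWhile bIsWs t' with
      | nil =>
        have hvt' : v = t' := by rw [← ht'eq, hws1c]; rfl
        have heH : (e == '#') = false :=
          dropWhile_head_false (fun ch => ch == '#') t e u' (by rw [← ht', ← hvt', hv'])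
        rw [hrswv_cons]
        simp [List.dropWhile_cons, heH]
      | cons w ws_ =>
        have hw : bIsWs w = true := hws1 w (by rw [hws1c]; simp)
        simp [List.dropWhile_cons, bIsWs_hash w hw]
    rw [hdrop]
    -- now strip (ws1 ++ rsw v) = rsw v
    have hmemall : ∀ x ∈ List.takeWhile bIsWs t' ++ rsw v, PySem.Chars.isspace x = bIsWs x := by
      intro x hx
      rcases List.mem_append.mp hx with hx | hx
      · exact ht x (hsub_t'_t x (hsub_ws1_t' x hx))
      · have hxv : x ∈ v := by
          unfold rsw at hx
          rw [List.mem_reverse] at hx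
          exact List.mem_reverse.mp ((List.dropWhile_sublist bIsWs).subset hx)
        exact ht x (hsub_t'_t x (hsub_v_t' x hxv))
    have hlstrip : List.dropWhile PySem.Chars.isspace (List.takeWhile bIsWs t' ++ rsw v) = rsw v := by
      rw [dropWhile_congr' _ bIsWs _ hmemall, List.dropWhile_append,
        List.dropWhile_eq_nil_iff.mpr hws1]
      simp only [List.isEmpty_nil, if_true]
      rw [hrswv_cons]
      simp [List.dropWhile_cons, hew]
    show PySem.Chars.rstrip (PySem.Chars.lstrip _) = _
    unfold PySem.Chars.lstrip
    rw [hlstrip]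
    unfold PySem.Chars.rstrip
    rw [dropWhile_congr' PySem.Chars.isspace bIsWs _ (fun x hx => hmemall x (List.mem_append.mpr (Or.inr (List.mem_reverse.mp hx))))]
    rw [← hv']
    exact rsw_idem v

-- the per-line equivalence
theorem perLine (line : List Char)
    (h : ∀ c ∈ line, PySem.Chars.isspace c = bIsWs c) :
    (let stripped := PySem.Chars.strip line
     if PySem.Chars.startswith stripped ['#'] then
       let header := PySem.Chars.strip (List.dropWhile (fun ch => ch == '#') stripped)
       if header ≠ [] then [header] else []
     else []) = bProcessLine line := by
  have hmem : ∀ (l : List Char), (∀ x ∈ l, x ∈ line) →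
      List.dropWhile PySem.Chars.isspace l = List.dropWhile bIsWs l :=
    fun l hl => dropWhile_congr' _ _ l (fun a ha => h a (hl a ha))
  have hsub1 : ∀ x ∈ List.dropWhile bIsWs line, x ∈ line :=
    fun x hx => (List.dropWhile_sublist _).subset hx
  have hstrip : PySem.Chars.strip line = rsw (List.dropWhile bIsWs line) := by
    unfold PySem.Chars.strip PySem.Chars.lstrip PySem.Chars.rstrip rsw
    rw [hmem line (fun x hx => hx),
      hmem (List.dropWhile bIsWs line).reverse (fun x hx => hsub1 x (List.mem_reverse.mp hx))]
  cases hl1 : List.dropWhile bIsWs line with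
  | nil =>
    have hstrip0 : PySem.Chars.strip line = [] := by rw [hstrip, hl1]; rfl
    simp only [hstrip0, bProcessLine, hl1]
    simp [PySem.Chars.startswith, List.isPrefixOf]
  | cons c t =>
    have hcw : bIsWs c = false := dropWhile_head_false bIsWs line c t hl1
    have hstrip1 : PySem.Chars.strip line = c :: rsw t := by
      rw [hstrip, hl1, rsw_cons c t hcw]
    have hsubt : ∀ x ∈ t, x ∈ line := fun x hx => hsub1 x (by rw [hl1]; exact List.mem_cons_of_mem _ hx)
    simp only [hstrip1, bProcessLine, hl1]
    by_cases hch : c = '#'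
    · subst hch
      have hstart : PySem.Chars.startswith ('#' :: rsw t) ['#'] = true := by
        simp [PySem.Chars.startswith, List.isPrefixOf]
      have hB : ((some '#' : Option Char) == some '#') = true := by decide
      simp only [hstart, if_true, List.head?_cons, hB]
      have hdropA : List.dropWhile (fun ch => ch == '#') ('#' :: rsw t) =
          List.dropWhile (fun ch => ch == '#') (rsw t) := by
        simp [List.dropWhile_cons]
      have hdropB : List.dropWhile (fun ch => ch == '#') ('#' :: t) =
          List.dropWhile (fun ch => ch == '#') t := by
        simp [List.dropWhile_cons]
      rw [hdropA, hdropB,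
        stripHash t (fun x hx => h x (hsubt x hx))]
      unfold rsw
      rfl
    · have hstart : PySem.Chars.startswith (c :: rsw t) ['#'] = false := by
        simp only [PySem.Chars.startswith, List.isPrefixOf,
          Bool.and_eq_false_iff, beq_eq_false_iff_ne, ne_eq]
        left
        exact fun hh => hch hh.symm
      have hB : ((some c : Option Char) == some '#') = false := by simp [hch]
      simp [hstart, hB]

-- ===== VERDICT (by name: the statement is the Claim_ definition above) =====
theorem get_file_sections_spec : Claim_equal_get_file_sections := by
  intro content hdom
  unfold Spec_get_file_sections get_file_sections get_file_sections_alt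
  rw [splitOn_newline, bGo_eq_flatMap]
  have hdom' : ∀ c ∈ content.toList, pvDomChar c = true := by
    unfold Dom_get_file_sections pvDomStr at hdom
    simpa [List.all_eq_true] using hdom
  have key : ∀ (acc : List (List Char)), ∀ line ∈ linesOf content.toList,
      (fun (sections : List (List Char)) (line : List Char) =>
        let stripped := PySem.Chars.strip line
        if PySem.Chars.startswith stripped ['#'] then
          let header := PySem.Chars.strip (List.dropWhile (fun ch => ch == '#') stripped)
          if header ≠ [] then sections ++ [header] else sections
        else sections) acc line = acc ++ bProcessLine line := by
    intro acc line hline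
    have hws : ∀ c ∈ line, PySem.Chars.isspace c = bIsWs c := by
      intro c hc
      obtain ⟨hcs, hnl⟩ := mem_linesOf _ line hline c hc
      exact isspace_eq_bIsWs c (hdom' c hcs) hnl
    rw [← perLine line hws]
    simp only
    split_ifs <;> simp
  show (List.foldl (fun (sections : List (List Char)) (line : List Char) =>
      let stripped := PySem.Chars.strip line
      if PySem.Chars.startswith stripped ['#'] then
        let header := PySem.Chars.strip (List.dropWhile (fun ch => ch == '#') stripped)
        if header ≠ [] then sections ++ [header] else sections
      else sections) [] (linesOf content.toList)).map String.ofList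
    = List.map String.ofList (List.flatMap bProcessLine (linesOf content.toList))
  rw [PySem.List.foldl_congr_mem _ _ _ [] key, PySem.List.foldl_append_eq_flatMap]
  simp
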